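-- pv_equiv track=rewrite | github.com/Akimkj/portfolio-UFMA | Algoritmo1/exercícios/ex031.py | menorMaior
-- ===== SOURCE A (Python) =====
-- def menorMaior(matriz):
--     menor = matriz[0][0]
--     maior = matriz[0][0]
--     for i in range(len(matriz)):
--         for j in range(len(matriz[i])):
--             if matriz[i][j] > maior:
--                 maior = matriz[i][j]
--             if matriz[i][j] < menor:
--                 menor = matriz[i][j]
--     return (menor, maior)
-- ===== SOURCE B (Python) =====
-- def menorMaior(matriz):
--     flat = [v for row in matriz for v in row]
--     return (min(flat), max(flat))
-- ===== Notes on version B (the rewrite author's own statement) =====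
-- stated objective: simpler
-- what changed: Replaces the manual index-based nested scan with running min/max state by flattening the matrix once and applying the builtin min and max reductions.
import Mathlib
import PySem

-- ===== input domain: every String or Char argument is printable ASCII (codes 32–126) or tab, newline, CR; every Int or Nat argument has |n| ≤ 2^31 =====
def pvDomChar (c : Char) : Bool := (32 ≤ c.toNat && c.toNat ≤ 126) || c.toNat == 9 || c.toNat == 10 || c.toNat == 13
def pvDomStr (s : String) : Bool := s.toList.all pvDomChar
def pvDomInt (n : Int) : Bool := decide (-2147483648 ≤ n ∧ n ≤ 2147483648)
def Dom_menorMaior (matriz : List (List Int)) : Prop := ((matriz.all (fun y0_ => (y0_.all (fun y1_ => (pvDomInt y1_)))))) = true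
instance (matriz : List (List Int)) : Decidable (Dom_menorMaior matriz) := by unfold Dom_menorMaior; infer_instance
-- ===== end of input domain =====

-- B flattens the matrix once and uses the builtin min/max reductions instead of A's
-- index-based nested scan with running state: simpler, same cost (return value only).

-- ===== PORT A =====
-- literal transliteration: seed = matriz[0][0] (in range under Pre_), then nested
-- index loops updating (menor, maior)
def menorMaior (matriz : List (List Int)) : Int × Int :=
  let seed := (matriz.headD []).headD 0
  (List.range matriz.length).foldl (fun st i =>
    let row := matriz.getD i []
    (List.range row.length).foldl (fun st j =>
      let v := row.getD j 0
      let maior := if v > st.2 then v else st.2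
      let menor := if v < st.1 then v else st.1
      (menor, maior)) st) (seed, seed)

-- ===== PORT B =====
def menorMaior_alt (matriz : List (List Int)) : Int × Int :=
  let flat := matriz.flatMap id
  ((PySem.List.min? flat (fun x => x)).getD 0, (PySem.List.max? flat (fun x => x)).getD 0)

-- ===== PRECONDITION & SPEC =====
-- A indexes matriz[0][0]: it raises IndexError exactly when the matrix is empty or its
-- first row is empty; Pre_ excludes exactly those inputs.
def Pre_menorMaior (matriz : List (List Int)) : Prop := matriz.headD [] ≠ []
instance (matriz : List (List Int)) : Decidable (Pre_menorMaior matriz) := by unfold Pre_menorMaior; infer_instance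
def pvWitness_menorMaior : List (List Int) := [[3, 1], [2, 9]]

def Spec_menorMaior (matriz : List (List Int)) (out : Int × Int) : Prop := out = menorMaior_alt matriz
instance (matriz : List (List Int)) (out : Int × Int) : Decidable (Spec_menorMaior matriz out) := by unfold Spec_menorMaior; infer_instance

-- ===== CLAIM (what is proved, stated in full; the proofs are below) =====
def Claim_equal_menorMaior : Prop := ∀ (matriz : List (List Int)), Dom_menorMaior matriz → Pre_menorMaior matriz → Spec_menorMaior matriz (menorMaior matriz)
-- ===== LEMMAS AND PROOFS =====

-- an index loop 'for i in range(len(l)): … l[i] …' is a fold over l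
theorem foldl_range_getD {α β : Type} (l : List α) (d : α) (f : β → α → β) (init : β) :
    (List.range l.length).foldl (fun st i => f st (l.getD i d)) init = l.foldl f init := by
  induction l generalizing init with
  | nil => simp
  | cons a t ih =>
    simp only [List.length_cons, List.range_succ_eq_map, List.foldl_cons, List.foldl_map,
      List.getD_cons_zero, List.getD_cons_succ]
    exact ih (f init a)

-- the combined (menor, maior) loop splits into a min-fold and a max-fold
theorem foldl_minmax (l : List Int) (a b : Int) :
    l.foldl (fun (st : Int × Int) v =>
      (if v < st.1 then v else st.1, if v > st.2 then v else st.2)) (a, b)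
      = (l.foldl min a, l.foldl max b) := by
  induction l generalizing a b with
  | nil => rfl
  | cons v t ih =>
    simp only [List.foldl_cons]
    rw [show (if v < a then v else a) = min a v by rw [min_def]; split_ifs <;> omega,
        show (if v > b then v else b) = max b v by rw [max_def]; split_ifs <;> omega]
    exact ih _ _

theorem menorMaior_spec : Claim_equal_menorMaior := by
  intro matriz _ hpre
  unfold Spec_menorMaior menorMaior menorMaior_alt Pre_menorMaior at *
  obtain ⟨r0, rest, rfl⟩ : ∃ r0 rest, matriz = r0 :: rest := by
    cases matriz with
    | nil => simp at hpre
    | cons r0 rest => exact ⟨r0, rest, rfl⟩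
  obtain ⟨v, t0, rfl⟩ : ∃ v t0, r0 = v :: t0 := by
    cases r0 with
    | nil => simp at hpre
    | cons v t0 => exact ⟨v, t0, rfl⟩
  dsimp only [List.headD_cons]
  rw [foldl_range_getD ((v :: t0) :: rest) []
    (fun (st : Int × Int) row => (List.range row.length).foldl (fun (st : Int × Int) j =>
      (if row.getD j 0 < st.1 then row.getD j 0 else st.1,
       if row.getD j 0 > st.2 then row.getD j 0 else st.2)) st) (v, v)]
  have houter : ((v :: t0) :: rest).foldl
      (fun (st : Int × Int) row => (List.range row.length).foldl (fun (st : Int × Int) j =>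
        (if row.getD j 0 < st.1 then row.getD j 0 else st.1,
         if row.getD j 0 > st.2 then row.getD j 0 else st.2)) st) (v, v)
      = ((v :: t0) :: rest).foldl
      (fun st row => row.foldl (fun (st : Int × Int) w =>
        (if w < st.1 then w else st.1, if w > st.2 then w else st.2)) st) (v, v) := by
    apply PySem.List.foldl_congr_mem
    intro acc row _
    exact foldl_range_getD row 0
      (fun (st : Int × Int) w => (if w < st.1 then w else st.1, if w > st.2 then w else st.2)) acc
  rw [houter, ← List.foldl_flatten, foldl_minmax]
  have hfl : ((v :: t0) :: rest).flatten = v :: (t0 ++ rest.flatten) := by simp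
  have hfm : ((v :: t0) :: rest).flatMap id = v :: (t0 ++ rest.flatten) := by
    rw [List.flatMap_id]; exact hfl
  rw [hfl, hfm, PySem.List.min?_id_cons, PySem.List.max?_id_cons]
  simp [min_self, max_self]
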